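-- pv_equiv track=rewrite | github.com/Annacaro22/4701Mancala | randomBot.py | steal
-- ===== SOURCE A (Python) =====
-- def steal(p1bowls, p2bowls):
--     stealmax = 0
--     for x in range(len(p2bowls)):
--         if p2bowls[x] == 0 and p1bowls[x] != 0:
--             for y in range(len(p2bowls)):
--                 if p2bowls[y] + y >= x:
--                     stealmax = max(stealmax, p1bowls[x])
--     return stealmax
-- ===== SOURCE B (Python) =====
-- def steal(p1bowls, p2bowls):
--     n = len(p2bowls)
--     reach = max((p2bowls[y] + y for y in range(n)), default=-1)
--     best = 0
--     for x in range(n):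
--         if p2bowls[x] == 0 and p1bowls[x] != 0 and x <= reach:
--             best = max(best, p1bowls[x])
--     return best
-- ===== Notes on version B (the rewrite author's own statement) =====
-- stated objective: alternative
-- what changed: replaces A's inner existence scan (rerun for every stealable bowl) by a single precomputed reach = max(p2bowls[y]+y) and one pass comparing x <= reach
import Mathlib
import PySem

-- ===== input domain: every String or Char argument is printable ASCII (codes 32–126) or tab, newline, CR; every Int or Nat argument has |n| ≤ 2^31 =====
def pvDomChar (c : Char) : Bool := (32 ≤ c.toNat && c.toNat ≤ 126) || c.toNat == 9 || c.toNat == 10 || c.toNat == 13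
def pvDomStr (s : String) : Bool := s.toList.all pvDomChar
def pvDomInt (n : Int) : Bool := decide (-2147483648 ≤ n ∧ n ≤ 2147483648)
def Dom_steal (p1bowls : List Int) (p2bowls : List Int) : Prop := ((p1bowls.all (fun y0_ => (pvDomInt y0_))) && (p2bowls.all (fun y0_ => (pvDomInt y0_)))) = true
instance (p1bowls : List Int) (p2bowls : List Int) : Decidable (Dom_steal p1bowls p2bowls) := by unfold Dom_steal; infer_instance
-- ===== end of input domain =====

-- B precomputes reach = max(p2bowls[y]+y) once and replaces A's inner existence scan by one comparison per bowl (alternative single-pass algorithm).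

-- ===== PORT A =====
def steal (p1bowls : List Int) (p2bowls : List Int) : Int :=
  (PySem.List.pyRange 0 p2bowls.length).foldl (fun stealmax x =>
    if PySem.List.pyGetD p2bowls x 0 = 0 ∧ PySem.List.pyGetD p1bowls x 0 ≠ 0 then
      (PySem.List.pyRange 0 p2bowls.length).foldl (fun sm y =>
        if PySem.List.pyGetD p2bowls y 0 + y ≥ x then max sm (PySem.List.pyGetD p1bowls x 0) else sm)
        stealmax
    else stealmax) 0

-- ===== PORT B =====
def steal_alt (p1bowls : List Int) (p2bowls : List Int) : Int :=
  let n : Int := p2bowls.length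
  let reach : Int :=
    PySem.List.maxD ((PySem.List.pyRange 0 n).map (fun y => PySem.List.pyGetD p2bowls y 0 + y))
      (fun z => z) (-1)
  (PySem.List.pyRange 0 n).foldl (fun best x =>
    if PySem.List.pyGetD p2bowls x 0 = 0 ∧ PySem.List.pyGetD p1bowls x 0 ≠ 0 ∧ x ≤ reach then
      max best (PySem.List.pyGetD p1bowls x 0)
    else best) 0

-- ===== PRECONDITION & SPEC =====
-- Pre_ excludes exactly the inputs on which Python A raises IndexError: a zero bowl of p2bowls
-- at an index beyond the end of p1bowls (B raises there too).
def Pre_steal (p1bowls : List Int) (p2bowls : List Int) : Prop :=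
  ∀ i : Nat, i < p2bowls.length → p2bowls.getD i 1 = 0 → i < p1bowls.length
instance (p1bowls : List Int) (p2bowls : List Int) : Decidable (Pre_steal p1bowls p2bowls) := by
  unfold Pre_steal; infer_instance

def pvWitness_steal : List Int × List Int := ([3, 0], [0, 5])

def Spec_steal (p1bowls : List Int) (p2bowls : List Int) (out : Int) : Prop := out = steal_alt p1bowls p2bowls
instance (p1bowls : List Int) (p2bowls : List Int) (out : Int) : Decidable (Spec_steal p1bowls p2bowls out) := by unfold Spec_steal; infer_instance

-- ===== CLAIM (what is proved, stated in full; the proofs are below) =====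
def Claim_equal_steal : Prop := ∀ (p1bowls : List Int) (p2bowls : List Int), Dom_steal p1bowls p2bowls → Pre_steal p1bowls p2bowls → Spec_steal p1bowls p2bowls (steal p1bowls p2bowls)

-- ===== LEMMAS AND PROOFS =====

-- A's inner loop only ever folds "max with the fixed value v when c holds": it equals a single
-- conditional max on whether any element satisfies c.
theorem pv_foldl_if_max (c : Int → Prop) [DecidablePred c] (v : Int) (l : List Int) :
    ∀ s : Int, l.foldl (fun sm y => if c y then max sm v else sm) s
      = if ∃ y ∈ l, c y then max s v else s := by
  induction l with
  | nil => intro s; simp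
  | cons a t ih =>
    intro s
    by_cases h : c a
    · simp only [List.foldl_cons, if_pos h, ih]
      have : (∃ y ∈ a :: t, c y) := ⟨a, List.mem_cons_self, h⟩
      rw [if_pos this]
      split_ifs with h2
      · rw [max_assoc, max_self]
      · rfl
    · simp only [List.foldl_cons, if_neg h, ih]
      congr 1
      simp [h]

-- "some list element is ≥ x" is "x ≤ max of the list (default -1)", for 0 ≤ x.
theorem pv_exists_le_maxD (L : List Int) (x : Int) (hx : 0 ≤ x) :
    (∃ v ∈ L, x ≤ v) ↔ x ≤ PySem.List.maxD L (fun z => z) (-1) := by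
  unfold PySem.List.maxD
  cases h : PySem.List.max? L (fun z => z) with
  | none =>
    have hL : L = [] := (PySem.List.max?_eq_none_iff L _).mp h
    subst hL
    simp only [Option.getD_none]
    constructor
    · rintro ⟨v, hv, -⟩; cases hv
    · intro hle; omega
  | some m =>
    have hm : m ∈ L := PySem.List.max?_mem h
    have hmax := PySem.List.max?_isMax h
    simp only [Option.getD_some]
    constructor
    · rintro ⟨v, hv, hxv⟩; exact hxv.trans (hmax v hv)
    · intro hle; exact ⟨m, hm, hle⟩

-- ===== VERDICT (by name: the statement is the Claim_ definition above) =====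
theorem steal_spec : Claim_equal_steal := by
  intro p1 p2 _hdom _hpre
  unfold Spec_steal steal steal_alt
  apply PySem.List.foldl_congr_mem
  intro acc x hx
  have hx0 : 0 ≤ x := (PySem.List.mem_pyRange_one.mp hx).1
  rw [pv_foldl_if_max (fun y => PySem.List.pyGetD p2 y 0 + y ≥ x) (PySem.List.pyGetD p1 x 0)]
  have hiff : (∃ y ∈ PySem.List.pyRange 0 (p2.length : Int), PySem.List.pyGetD p2 y 0 + y ≥ x)
      ↔ x ≤ PySem.List.maxD
          ((PySem.List.pyRange 0 (p2.length : Int)).map (fun y => PySem.List.pyGetD p2 y 0 + y))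
          (fun z => z) (-1) := by
    rw [← pv_exists_le_maxD _ x hx0]
    simp [ge_iff_le]
  split_ifs with h1 h2 h3 h4 h5
  · rfl
  · rw [← hiff] at h3; exact absurd ⟨h1.1, h1.2, h2⟩ h3
  · rw [← hiff] at h4; exact absurd h4.2.2 h2
  · rfl
  · exact absurd ⟨h5.1, h5.2.1⟩ h1
  · rfl
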